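-- pv_equiv track=rewrite | github.com/dholzmueller/pytabkit | pytabkit/bench/data/uci_file_ops.py | get_category_replace_string
-- ===== SOURCE A (Python) =====
-- def get_category_replace_string(category_size, position, separator):
--
--     string = ''
--     for i in range(position):
--         string = string + '0' + separator
--
--     string = string + '1' + separator
--
--
--     for i in range(position + 1, category_size):
--         string = string + '0' + separator
--
--     string = string[0:len(string) - len(separator)]
--
--     return string
-- ===== SOURCE B (Python) =====
-- def get_category_replace_string(category_size, position, separator):
--     # '1' anchored between two repeated blocks: zeros before it carry a trailing
--     # separator, zeros after it carry a leading separator, so no trim is needed.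
--     return ('0' + separator) * position + '1' + (separator + '0') * max(0, category_size - position - 1)
-- ===== Notes on version B (the rewrite author's own statement) =====
-- stated objective: faster
-- what changed: Replaces A's two concatenation loops plus trailing-separator trim by two closed-form repeated blocks ('0'+sep)*position and (sep+'0')*max(0,category_size-position-1) anchored around '1', so no loop and no trim at all.
import Mathlib
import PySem

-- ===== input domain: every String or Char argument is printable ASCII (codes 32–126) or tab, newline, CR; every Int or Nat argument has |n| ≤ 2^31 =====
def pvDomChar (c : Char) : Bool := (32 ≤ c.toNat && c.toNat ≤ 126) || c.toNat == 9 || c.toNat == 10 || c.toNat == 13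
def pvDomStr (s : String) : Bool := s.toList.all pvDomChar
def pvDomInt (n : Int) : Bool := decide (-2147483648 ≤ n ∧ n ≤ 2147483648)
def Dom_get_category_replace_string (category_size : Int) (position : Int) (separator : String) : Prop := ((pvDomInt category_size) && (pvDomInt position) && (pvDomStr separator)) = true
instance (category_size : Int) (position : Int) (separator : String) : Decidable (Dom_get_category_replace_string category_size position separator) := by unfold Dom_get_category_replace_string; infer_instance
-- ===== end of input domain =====

-- B replaces A's two concatenation loops and trailing-separator trim by two closed-form
-- repeated blocks anchored around '1' (zeros after '1' carry a LEADING separator), so no trim exists.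

-- ===== PORT A =====
def get_category_replace_string (category_size : Int) (position : Int) (separator : String) : String :=
  -- string = ''
  let sep := separator.toList
  -- for i in range(position): string = string + '0' + separator
  let s1 := (PySem.List.pyRange 0 position 1).foldl (fun acc _ => acc ++ ['0'] ++ sep) ([] : List Char)
  -- string = string + '1' + separator
  let s2 := s1 ++ ['1'] ++ sep
  -- for i in range(position + 1, category_size): string = string + '0' + separator
  let s3 := (PySem.List.pyRange (position + 1) category_size 1).foldl (fun acc _ => acc ++ ['0'] ++ sep) s2
  -- string = string[0:len(string) - len(separator)]
  String.ofList (PySem.List.slice s3 (some 0) (some ((s3.length : Int) - (sep.length : Int))))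

-- ===== PORT B =====
def get_category_replace_string_alt (category_size : Int) (position : Int) (separator : String) : String :=
  let sL := separator.toList
  -- ('0' + separator) * position
  let left := (List.replicate position.toNat (['0'] ++ sL)).flatten
  -- (separator + '0') * max(0, category_size - position - 1)
  let right := (List.replicate (max 0 (category_size - position - 1)).toNat (sL ++ ['0'])).flatten
  -- left + '1' + right
  String.ofList (left ++ ['1'] ++ right)

-- ===== PRECONDITION & SPEC =====
def Spec_get_category_replace_string (category_size : Int) (position : Int) (separator : String) (out : String) : Prop := out = get_category_replace_string_alt category_size position separator
instance (category_size : Int) (position : Int) (separator : String) (out : String) : Decidable (Spec_get_category_replace_string category_size position separator out) := by unfold Spec_get_category_replace_string; infer_instance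

-- ===== CLAIM (what is proved, stated in full; the proofs are below) =====
def Claim_equal_get_category_replace_string : Prop := ∀ (category_size : Int) (position : Int) (separator : String), Dom_get_category_replace_string category_size position separator → Spec_get_category_replace_string category_size position separator (get_category_replace_string category_size position separator)

-- ===== LEMMAS AND PROOFS =====

-- flatMap of a constant depends only on the length of the list
theorem flatMap_const_eq {α β : Type} (l : List α) (u : List β) :
    l.flatMap (fun _ => u) = (List.replicate l.length u).flatten := by
  induction l with
  | nil => rfl
  | cons x xs ih => simp [List.flatMap_cons, List.replicate_succ, ih]

-- one '0'+sep-appending loop over range(a, b) in closed form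
theorem foldl_seg (sL : List Char) (a b : Int) (init : List Char) :
    (PySem.List.pyRange a b 1).foldl (fun acc _ => acc ++ ['0'] ++ sL) init
      = init ++ (List.replicate (b - a).toNat (['0'] ++ sL)).flatten := by
  rw [show (fun acc (_ : Int) => acc ++ ['0'] ++ sL) = (fun acc (_ : Int) => acc ++ (['0'] ++ sL)) from by
    funext x y; rw [List.append_assoc]]
  rw [PySem.List.foldl_append_eq_flatMap, flatMap_const_eq, PySem.List.length_pyRange_one]

-- shifting the separator across a block of repeated (x ++ sep) segments
theorem sep_shift (sL x : List Char) (m : Nat) :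
    sL ++ (List.replicate m (x ++ sL)).flatten
      = (List.replicate m (sL ++ x)).flatten ++ sL := by
  induction m with
  | zero => simp
  | succ k ih => simp only [List.replicate_succ, List.flatten_cons, List.append_assoc, ih]

-- ===== VERDICT (by name: the statement is the Claim_ definition above) =====
theorem get_category_replace_string_spec : Claim_equal_get_category_replace_string := by
  intro cs pos sep _
  unfold Spec_get_category_replace_string get_category_replace_string get_category_replace_string_alt
  dsimp only
  rw [foldl_seg, foldl_seg]
  have hm : (cs - (pos + 1)).toNat = (max 0 (cs - pos - 1)).toNat := by omega
  have hp : (pos - 0).toNat = pos.toNat := by omega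
  rw [hm, hp]
  set sL := sep.toList
  set P := (List.replicate pos.toNat (['0'] ++ sL)).flatten with hP
  set m := (max 0 (cs - pos - 1)).toNat
  set R := (List.replicate m (sL ++ ['0'])).flatten with hR
  have hfull : ([] : List Char) ++ P ++ ['1'] ++ sL
        ++ (List.replicate m (['0'] ++ sL)).flatten
      = (P ++ ['1'] ++ R) ++ sL := by
    rw [List.nil_append, List.append_assoc (P ++ ['1']), sep_shift, hR]
    simp [List.append_assoc]
  rw [hfull]
  have hcast : (((P ++ ['1'] ++ R) ++ sL).length : Int) - (sL.length : Int)
      = ((P ++ ['1'] ++ R).length : Nat) := by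
    push_cast [List.length_append]; ring
  rw [hcast, PySem.List.slice_zero_start, PySem.List.slice_to_natCast, List.take_left]
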